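-- pv_equiv track=rewrite | github.com/remigenet/Projet_Exploration_de_donnee | Projet Explo Codes/animation/animation_creation_accelerated_4.py | dict_pos
-- ===== SOURCE A (Python) =====
-- def dict_pos(t):#,h):
--     my_dict={}
--     pos=0
--     for node in t:
--         if my_dict.get(node) is None:
--             my_dict.update({node: pos})
--             pos+=1
-- #    for node in h:
-- #        if my_dict.get(node) is None:
-- #            my_dict.update({node: pos})
-- #            pos+=1
--     return my_dict
-- ===== SOURCE B (Python) =====
-- def dict_pos(t):
--     # Stage 1: first-occurrence index of every element, by overwriting in reverse
--     # (the earliest index is written last, so it wins).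
--     first = {node: i for i, node in reversed(list(enumerate(t)))}
--     # Stage 2: sort the distinct elements by that index (keys are unique, so the
--     # order is deterministic), then assign positions by enumeration.
--     order = sorted(first, key=first.get)
--     return {node: pos for pos, node in enumerate(order)}
-- ===== Notes on version B (the rewrite author's own statement) =====
-- stated objective: alternative
-- what changed: Replaces A's single pass interleaving a membership test with a running counter by three stages: build a first-occurrence-index map by overwriting a reversed enumeration, sort the distinct elements by that index, then assign positions by enumeration.
import Mathlib
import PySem

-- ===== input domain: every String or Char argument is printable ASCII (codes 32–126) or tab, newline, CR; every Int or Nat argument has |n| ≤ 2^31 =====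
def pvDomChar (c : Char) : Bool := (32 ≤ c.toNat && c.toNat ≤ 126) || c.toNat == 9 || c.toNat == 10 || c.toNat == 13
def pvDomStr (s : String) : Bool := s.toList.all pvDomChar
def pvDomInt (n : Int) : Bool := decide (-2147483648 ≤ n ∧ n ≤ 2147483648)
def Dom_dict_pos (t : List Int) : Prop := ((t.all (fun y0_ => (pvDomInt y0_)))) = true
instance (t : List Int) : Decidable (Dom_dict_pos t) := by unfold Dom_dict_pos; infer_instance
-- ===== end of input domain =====

-- B replaces A's one-pass counter with staged sort-then-scan: build a first-occurrence-index map by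
-- reversed overwrite, sort the distinct elements by that index, then enumerate; not faster (O(n log n)).

-- ===== PORT A =====
def dict_pos (t : List Int) : List (Int × Int) :=
  (t.foldl
    (fun s node =>
      if s.1.get? node = none then (s.1.insert node s.2, s.2 + 1) else s)
    ((PySem.Dict.empty : PySem.Dict Int Int), (0 : Int))).1.items

-- ===== PORT B =====
-- {node: i for i, node in reversed(list(enumerate(t)))}: a dict comprehension is insert-with-overwrite
-- over the pairs in order, here the reversed enumeration.
def pv_first (t : List Int) : PySem.Dict Int Int :=
  (PySem.List.enumerate t 0).reverse.foldl (fun d p => d.insert p.2 p.1) PySem.Dict.empty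

-- sorted(first, key=first.get): iterates the dict's keys; first.get is total on them and injective
-- (each key holds its unique first-occurrence index), so the sort is deterministic; the .getD 0
-- default is never reached on the keys.
def dict_pos_alt (t : List Int) : List (Int × Int) :=
  (PySem.List.enumerate
      (PySem.List.sorted (pv_first t).keys
        (fun node => (pv_first t).getD node 0) false) 0).map
    (fun p => (p.2, p.1))

-- ===== PRECONDITION & SPEC =====
def Spec_dict_pos (t : List Int) (out : List (Int × Int)) : Prop := out = dict_pos_alt t
instance (t : List Int) (out : List (Int × Int)) : Decidable (Spec_dict_pos t out) := by unfold Spec_dict_pos; infer_instance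

-- ===== CLAIM (what is proved, stated in full; the proofs are below) =====
def Claim_equal_dict_pos : Prop := ∀ (t : List Int), Dom_dict_pos t → Spec_dict_pos t (dict_pos t)

-- ===== LEMMAS AND PROOFS =====

/-- For `a ∈ xs`, `a ≠ x`, the first-occurrence key in `x :: xs` is one more than in `xs`. -/
lemma pv_key_cons {x a : Int} (xs : List Int) (hne : x ≠ a) (hmem : a ∈ xs) :
    (PySem.List.index? (x :: xs) a).getD 0 = (PySem.List.index? xs a).getD 0 + 1 := by
  rw [PySem.List.index?_cons_of_ne xs hne]
  obtain ⟨k, hk⟩ := Option.isSome_iff_exists.mp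
    ((PySem.List.index?_isSome_iff (xs := xs) (v := a)).mpr hmem)
  rw [hk]
  rfl

/-- `set(t)` is strictly increasing under the first-occurrence-index key. -/
lemma pv_ofList_pairwise (t : List Int) :
    (PySem.Set.ofList t).Pairwise
      (fun a b => (PySem.List.index? t a).getD 0 < (PySem.List.index? t b).getD 0) := by
  induction t with
  | nil => simp [PySem.Set.ofList]
  | cons x xs ih =>
    rw [PySem.Set.ofList_cons]
    constructor
    · intro b hb
      obtain ⟨hbmem', hbne⟩ := (PySem.Set.mem_discard _ _ _).mp hb
      have hbmem : b ∈ xs := (PySem.Set.mem_ofList _ _).mp hbmem'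
      rw [pv_key_cons xs (Ne.symm hbne) hbmem, PySem.List.index?_cons_self]
      simp
    · have hsub : ((PySem.Set.ofList xs).discard x).Sublist (PySem.Set.ofList xs) := by
        simp only [PySem.Set.discard]
        apply List.filter_sublist
      refine (ih.sublist hsub).imp_of_mem ?_
      intro a b ha hb hlt
      obtain ⟨hamem', hane⟩ := (PySem.Set.mem_discard _ _ _).mp ha
      obtain ⟨hbmem', hbne⟩ := (PySem.Set.mem_discard _ _ _).mp hb
      rw [pv_key_cons xs (Ne.symm hane) ((PySem.Set.mem_ofList _ _).mp hamem'),
          pv_key_cons xs (Ne.symm hbne) ((PySem.Set.mem_ofList _ _).mp hbmem')]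
      omega

/-- Loop invariant for A: if `d.items` already enumerates `d.keys` (value = position),
then after A's loop over `t` the items enumerate `Set.update d.keys t`. -/
lemma dict_pos_loop (t : List Int) :
    ∀ d : PySem.Dict Int Int,
      d.items = (PySem.List.enumerate d.keys 0).map (fun p => (p.2, p.1)) →
      (t.foldl
        (fun s node =>
          if s.1.get? node = none then (s.1.insert node s.2, s.2 + 1) else s)
        (d, (d.size : Int))).1.items
        = (PySem.List.enumerate (PySem.Set.update d.keys t) 0).map (fun p => (p.2, p.1)) := by
  induction t with
  | nil => intro d h; simpa using h
  | cons node rest ih =>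
    intro d h
    by_cases hc : d.get? node = none
    · have hnc : d.contains node = false := by
        simpa [PySem.Dict.get?_eq_none_iff_contains] using hc
      have hkeys : (d.insert node (d.size : Int)).keys = d.keys ++ [node] :=
        PySem.Dict.keys_insert_of_not_contains (v := (d.size : Int)) (h := hnc)
      have hsize : ((d.insert node (d.size : Int)).size : Int) = (d.size : Int) + 1 := by
        simp [PySem.Dict.size_insert, hnc]
      have hlen : d.keys.length = d.size := by
        simp [PySem.Dict.keys, PySem.Dict.size]
      have hitems : (d.insert node (d.size : Int)).items
          = (PySem.List.enumerate ((d.insert node (d.size : Int)).keys) 0).map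
              (fun p => (p.2, p.1)) := by
        rw [PySem.Dict.items_insert_of_not_contains (h := hnc), hkeys,
          PySem.List.enumerate_append, List.map_append, ← h]
        simp [PySem.List.enumerate, hlen]
      have hadd : PySem.Set.add d.keys node = d.keys ++ [node] := by
        have : node ∉ d.keys := by
          intro hmem
          have := (PySem.Dict.contains_iff_mem_keys (d := d) (k := node)).mpr hmem
          simp [hnc] at this
        simp [PySem.Set.add, this]
      have := ih (d.insert node (d.size : Int)) hitems
      rw [hsize] at this
      simpa [List.foldl_cons, hc, hkeys, PySem.Set.update, hadd] using this
    · have hmem : node ∈ d.keys := by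
        have : (d.get? node).isSome := Option.isSome_iff_ne_none.mpr hc
        have hcon : d.contains node = true := by
          rw [PySem.Dict.contains_eq_isSome_get?]; exact this
        exact (PySem.Dict.contains_iff_mem_keys d node).mp hcon
      have hadd : PySem.Set.add d.keys node = d.keys := by
        simp [PySem.Set.add, hmem]
      have := ih d h
      simpa [List.foldl_cons, hc, PySem.Set.update, hadd] using this

/-- The reversed-enumeration dict maps each element of `t` to its first-occurrence
index shifted by the enumeration start (the earliest index is inserted last, so it wins). -/
lemma pv_first_get (t : List Int) :
    ∀ (s : Int) (d : PySem.Dict Int Int) (a : Int), a ∈ t →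
      ((PySem.List.enumerate t s).reverse.foldl (fun d p => d.insert p.2 p.1) d).get? a
        = some (((PySem.List.index? t a).getD 0 : Int) + s) := by
  induction t with
  | nil => intro s d a ha; cases ha
  | cons x xs ih =>
    intro s d a ha
    rw [PySem.List.enumerate_cons, List.reverse_cons, List.foldl_append]
    by_cases hax : a = x
    · subst hax
      rw [List.foldl_cons, List.foldl_nil, PySem.Dict.get?_insert_self,
        PySem.List.index?_cons_self]
      simp
    · have hmem : a ∈ xs := by
        rcases List.mem_cons.mp ha with h | h
        · exact absurd h hax
        · exact h
      rw [List.foldl_cons, List.foldl_nil,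
        PySem.Dict.get?_insert_of_ne _ _ hax, ih (s + 1) d a hmem,
        PySem.List.index?_cons_of_ne xs (Ne.symm hax)]
      obtain ⟨k, hk⟩ := Option.isSome_iff_exists.mp
        ((PySem.List.index?_isSome_iff (xs := xs) (v := a)).mpr hmem)
      rw [hk]
      simp only [Option.map_some, Option.getD_some]
      push_cast
      ring_nf

/-- The keys of the reversed-enumeration dict are `set(t.reverse)`. -/
lemma pv_first_keys (t : List Int) :
    (pv_first t).keys = PySem.Set.ofList t.reverse := by
  unfold pv_first
  have h := PySem.Dict.keys_foldl_insert_key (ν := Int)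
    ((PySem.List.enumerate t 0).reverse) (fun p => p.2) (fun _ p => p.1) PySem.Dict.empty
  simpa [PySem.Set.update_empty, List.map_reverse, PySem.List.map_snd_enumerate,
    PySem.Dict.empty, PySem.Dict.keys] using h

/-- Sorting the dict's keys by their stored first-occurrence index yields `set(t)`
in first-occurrence order. -/
lemma pv_sorted_first (t : List Int) :
    PySem.List.sorted (pv_first t).keys
      (fun node => (pv_first t).getD node 0) false = PySem.Set.ofList t := by
  apply PySem.List.sorted_eq_of_perm_of_pairwise_lt
  · rw [pv_first_keys]
    refine (List.perm_ext_iff_of_nodup (PySem.Set.nodup_ofList _)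
      (PySem.Set.nodup_ofList _)).mpr ?_
    intro a
    simp [PySem.Set.mem_ofList]
  · refine (pv_ofList_pairwise t).imp_of_mem ?_
    intro a b ha hb hlt
    have hat : a ∈ t := (PySem.Set.mem_ofList _ _).mp ha
    have hbt : b ∈ t := (PySem.Set.mem_ofList _ _).mp hb
    have hga := pv_first_get t 0 PySem.Dict.empty a hat
    have hgb := pv_first_get t 0 PySem.Dict.empty b hbt
    simp only [PySem.Dict.getD, pv_first, hga, hgb, Option.getD_some]
    omega

-- ===== VERDICT (by name: the statement is the Claim_ definition above) =====
theorem dict_pos_spec : Claim_equal_dict_pos := by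
  intro t _
  unfold Spec_dict_pos dict_pos dict_pos_alt
  rw [pv_sorted_first]
  have hA := dict_pos_loop t PySem.Dict.empty (by simp [PySem.Dict.empty, PySem.Dict.keys])
  simpa [PySem.Dict.empty, PySem.Dict.size, PySem.Dict.items, PySem.Set.update,
    PySem.Set.ofList] using hA
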